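-- pv_equiv track=rewrite | github.com/FelixDou/lerobot | examples/subtasks/generate_subtasks_offline.py | _extract_subtask_sentence
-- ===== SOURCE A (Python) =====
-- def _extract_subtask_sentence(text: str) -> str:
--     sentences = [s.strip() for s in text.replace("\n", " ").split(".") if s.strip()]
--     if not sentences:
--         return text.strip()
--     blacklist = ("got it", "let's", "task is", "the task is", "task:", "image", "i will", "i can")
--     for sentence in reversed(sentences):
--         lowered = sentence.lower()
--         if any(term in lowered for term in blacklist):
--             continue
--         return sentence
--     return sentences[-1]
-- ===== SOURCE B (Python) =====
-- def _extract_subtask_sentence(text: str) -> str: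
--     blacklist = ("got it", "let's", "task is", "the task is", "task:", "image", "i will", "i can")
--     last = None   # last non-empty stripped sentence seen so far
--     best = None   # last non-blacklisted sentence seen so far
--     for chunk in text.replace("\n", " ").split("."):
--         s = chunk.strip()
--         if not s:
--             continue
--         last = s
--         low = s.lower()
--         if not any(t in low for t in blacklist):
--             best = s
--     if last is None:
--         return text.strip()
--     return best if best is not None else last
-- ===== Notes on version B (the rewrite author's own statement) =====
-- stated objective: alternative
-- what changed: Replaces A's two-stage build-sentence-list-then-scan-backwards-with-early-return by a single forward pass over the raw split chunks that keeps two accumulators (last non-empty sentence and last non-blacklisted sentence) and never materialises the sentence list or reverses it.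
import Mathlib
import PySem

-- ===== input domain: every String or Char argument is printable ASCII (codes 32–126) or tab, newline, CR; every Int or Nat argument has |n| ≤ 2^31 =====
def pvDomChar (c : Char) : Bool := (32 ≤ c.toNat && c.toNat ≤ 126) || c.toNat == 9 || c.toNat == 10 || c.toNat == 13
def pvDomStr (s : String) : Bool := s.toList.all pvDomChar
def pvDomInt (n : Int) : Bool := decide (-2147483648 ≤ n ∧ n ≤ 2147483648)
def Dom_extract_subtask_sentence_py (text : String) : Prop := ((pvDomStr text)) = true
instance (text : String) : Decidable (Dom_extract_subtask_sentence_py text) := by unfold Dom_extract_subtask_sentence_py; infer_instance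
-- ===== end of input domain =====

-- B replaces A's build-list-then-backward-scan by one forward pass over the raw split
-- chunks with two accumulators (last sentence, last non-blacklisted sentence); objective: alternative.

-- ===== PORT A =====
def pvBlacklist : List String :=
  ["got it", "let's", "task is", "the task is", "task:", "image", "i will", "i can"]

-- [s.strip() for s in text.replace("\n", " ").split(".") if s.strip()]
def pvSentences (text : String) : List String :=
  ((PySem.Str.split? (PySem.Str.replace text "\n" " ") ".").getD []).filterMap
    (fun s => let t := PySem.Str.strip s; if t = "" then none else some t)

-- the `for sentence in reversed(sentences)` loop with `continue`/early `return`
def pvScanA : List String → Option String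
  | [] => none
  | s :: rest =>
    let lowered := PySem.Str.lower s
    if pvBlacklist.any (fun term => PySem.Str.isIn term lowered) then pvScanA rest
    else some s

def extract_subtask_sentence_py (text : String) : String :=
  let sentences := pvSentences text
  if sentences = [] then PySem.Str.strip text
  else
    match pvScanA sentences.reverse with
    | some s => s
    | none => sentences.getLastD ""

-- ===== PORT B =====
-- `not any(t in low for t in blacklist)` from Source B's loop body
def pvValidP (s : String) : Bool :=
  !(pvBlacklist.any (fun t => PySem.Str.isIn t (PySem.Str.lower s)))

-- one step of Source B's loop body over state (last, best)
def pvStepB (acc : Option String × Option String) (chunk : String) :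
    Option String × Option String :=
  let s := PySem.Str.strip chunk
  if s = "" then acc
  else if pvValidP s then (some s, some s)
  else (some s, acc.2)

def extract_subtask_sentence_py_alt (text : String) : String :=
  let chunks := (PySem.Str.split? (PySem.Str.replace text "\n" " ") ".").getD []
  let r := chunks.foldl pvStepB (none, none)
  match r.1 with
  | none => PySem.Str.strip text
  | some last =>
    match r.2 with
    | some best => best
    | none => last

-- ===== PRECONDITION & SPEC =====
def Spec_extract_subtask_sentence_py (text : String) (out : String) : Prop := out = extract_subtask_sentence_py_alt text
instance (text : String) (out : String) : Decidable (Spec_extract_subtask_sentence_py text out) := by unfold Spec_extract_subtask_sentence_py; infer_instance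

-- ===== CLAIM =====
def Claim_equal_extract_subtask_sentence_py : Prop := ∀ (text : String), Dom_extract_subtask_sentence_py text → Spec_extract_subtask_sentence_py text (extract_subtask_sentence_py text)

-- ===== LEMMAS AND PROOFS =====
def pvSent (l : List String) : List String :=
  l.filterMap (fun s => let t := PySem.Str.strip s; if t = "" then none else some t)

theorem pvSentences_eq (text : String) :
    pvSent ((PySem.Str.split? (PySem.Str.replace text "\n" " ") ".").getD []) = pvSentences text := rfl

theorem pvOrSomeOr (x : Option String) (v : String) (y : Option String) :
    (x.or (some v)).or y = x.or (some v) := by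
  cases x <;> rfl

theorem pvGetLast?_cons_or (a : String) (l : List String) :
    (a :: l).getLast? = l.getLast?.or (some a) := by
  cases h : l.getLast? with
  | none => simp [List.getLast?_cons, h, Option.or]
  | some v => simp [List.getLast?_cons, h, Option.or]

-- the backward scan returns the first valid element = head? of the filtered list
theorem pvScanA_eq_head_filter (l : List String) :
    pvScanA l = (l.filter pvValidP).head? := by
  induction l with
  | nil => rfl
  | cons s rest ih =>
    simp only [pvScanA, List.filter_cons]
    by_cases hb : (pvBlacklist.any (fun term => PySem.Str.isIn term (PySem.Str.lower s))) = true
    · have hv : pvValidP s = false := by unfold pvValidP; rw [hb]; rfl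
      rw [if_pos hb, hv]
      simpa using ih
    · have hv : pvValidP s = true := by unfold pvValidP; rw [eq_false_of_ne_true hb]; rfl
      rw [if_neg hb, hv]
      simp

-- the forward fold computes (last sentence, last valid sentence), seeded by the accumulators
theorem pvFoldB_eq (l : List String) (a b : Option String) :
    l.foldl pvStepB (a, b) =
      ((pvSent l).getLast?.or a, ((pvSent l).filter pvValidP).getLast?.or b) := by
  induction l generalizing a b with
  | nil => simp [pvSent]
  | cons c rest ih =>
    by_cases hs : PySem.Str.strip c = ""
    · have hstep : pvStepB (a, b) c = (a, b) := by simp [pvStepB, hs]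
      have hsent : pvSent (c :: rest) = pvSent rest := by simp [pvSent, hs]
      rw [List.foldl_cons, hstep, hsent, ih]
    · have hsent : pvSent (c :: rest) = PySem.Str.strip c :: pvSent rest := by
        simp [pvSent, hs]
      by_cases hv : pvValidP (PySem.Str.strip c) = true
      · have hstep : pvStepB (a, b) c = (some (PySem.Str.strip c), some (PySem.Str.strip c)) := by
          simp [pvStepB, hs, hv]
        rw [List.foldl_cons, hstep, ih, hsent]
        rw [List.filter_cons, if_pos hv, pvGetLast?_cons_or, pvGetLast?_cons_or]
        simp only [pvOrSomeOr]
      · have hv' : pvValidP (PySem.Str.strip c) = false := eq_false_of_ne_true hv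
        have hstep : pvStepB (a, b) c = (some (PySem.Str.strip c), b) := by
          simp [pvStepB, hs, hv']
        rw [List.foldl_cons, hstep, ih, hsent]
        rw [List.filter_cons, if_neg (by simp [hv']), pvGetLast?_cons_or]
        simp only [pvOrSomeOr]

-- ===== VERDICT =====
theorem extract_subtask_sentence_py_spec : Claim_equal_extract_subtask_sentence_py := by
  intro text _
  unfold Spec_extract_subtask_sentence_py extract_subtask_sentence_py extract_subtask_sentence_py_alt
  simp only [pvFoldB_eq, pvSentences_eq]
  set sentences := pvSentences text with hsdef
  by_cases hnil : sentences = []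
  · simp [hnil]
  · have hlast : ∃ v, sentences.getLast? = some v := by
      cases h : sentences.getLast? with
      | none => exact absurd (List.getLast?_eq_none_iff.mp h) hnil
      | some v => exact ⟨v, rfl⟩
    obtain ⟨v, hv⟩ := hlast
    simp only [hnil, if_false, hv, Option.or]
    rw [pvScanA_eq_head_filter, List.filter_reverse, List.head?_reverse]
    cases hb : (sentences.filter pvValidP).getLast? with
    | none => simp [List.getLastD_eq_getLast?, hv]
    | some w => simp
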